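-- pv_equiv track=rewrite | github.com/gali1998/ExtendedIntroToCSHomework | 5/reference.py | prefix_suffix_overlap_hash1
-- ===== SOURCE A (Python) =====
-- class Dict:
--     def __init__(self, m, hash_func=hash):
--         """ initial hash table, m empty entries """
--         self.table = [[] for i in range(m)]
--         self.hash_mod = lambda x: hash_func(x) % m
--
--     def __repr__(self):
--         L = [self.table[i] for i in range(len(self.table))]
--         return "".join([str(i) + " " + str(L[i]) + "\n" for i in range(len(self.table))])
--
--     def insert(self, key, value):
--         """ insert key,value into table
--             Allow repetitions of keys """
--         i = self.hash_mod(key)  # hash on key only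
--         item = [key, value]  # pack into one item
--         self.table[i].append(item)
--
--     def find(self, key):
--         """ returns ALL values of key as a list, empty list if none """
--         res = []
--         i = self.hash_mod(key)
--         for item in self.table[i]:
--             if item[0] == key:  # Avoiding collisions
--                 res.append(item[1])
--         return res
--
-- def prefix_suffix_overlap_hash1(lst, k):
--     dictionary = Dict(len(lst))
--     res = []
--     for i in range(0, len(lst)):
--         # Going through all the strings once to take prefixes
--         prefix = lst[i][0:k]  # Determining the prefix of said string
--         dictionary.insert(prefix, i)  # Adding the prefix to the dictionary in it's right places
--     for j in range(0, len(lst)):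
--         # Going through all the strings to determine suffixes
--         suffix = lst[j][-k:]
--         # Searching the dictionary for a place with this suffix as a key
--         prefix_locations = dictionary.find(suffix)
--         for num in prefix_locations:
--             # All the numbers in this place in the dictionary represent indexes where
--             # this string appeared as a suffix, so now we'll add to the results all the
--             # pairs of prefix index and suffix index
--             if num != j:  # Same string
--                 res.append((num, j))
--     return res
-- ===== SOURCE B (Python) =====
-- def prefix_suffix_overlap_hash1(lst, k):
--     res = []
--     for j in range(len(lst)):
--         suffix = lst[j][-k:]
--         for i in range(len(lst)):
--             if i != j and lst[i][0:k] == suffix: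
--                 res.append((i, j))
--     return res
-- ===== Notes on version B (the rewrite author's own statement) =====
-- stated objective: simpler
-- what changed: Replaced the custom chained hash table (build prefix index, then look up each suffix) with a direct double loop comparing lst[i][0:k] to lst[j][-k:]; same output order since bucket order within a key is ascending i.
import Mathlib
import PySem

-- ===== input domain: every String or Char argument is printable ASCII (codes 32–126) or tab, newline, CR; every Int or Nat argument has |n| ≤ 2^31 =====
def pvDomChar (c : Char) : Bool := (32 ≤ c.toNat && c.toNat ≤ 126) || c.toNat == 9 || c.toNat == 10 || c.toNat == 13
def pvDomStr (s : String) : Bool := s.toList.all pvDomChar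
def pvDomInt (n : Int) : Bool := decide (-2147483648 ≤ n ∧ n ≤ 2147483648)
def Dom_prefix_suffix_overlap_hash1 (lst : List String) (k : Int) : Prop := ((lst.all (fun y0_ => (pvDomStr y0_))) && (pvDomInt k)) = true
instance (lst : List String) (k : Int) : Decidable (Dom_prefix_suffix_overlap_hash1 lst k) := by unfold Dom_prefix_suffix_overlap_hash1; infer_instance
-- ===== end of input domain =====

-- B replaces A's hand-rolled chained hash table (index all prefixes, then look up each
-- suffix) by a plain double loop comparing lst[i][0:k] with lst[j][-k:]; objective: simpler.
-- Python's string hash is seed-randomized, so the port uses a concrete hash function; the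
-- result is hash-independent (find filters the bucket by key, insertion order is ascending i).

-- ===== PORT A =====
-- s[0:k]  (Python slice, clamped, negative k handled by PySem.List.slice)
def pvPrefix (s : String) (k : Int) : List Char := PySem.List.slice s.toList (some 0) (some k)
-- s[-k:]
def pvSuffix (s : String) (k : Int) : List Char := PySem.List.slice s.toList (some (-k)) none
-- stands in for Python's (randomized) hash; any function works, the output is hash-independent
def pvHash (cs : List Char) : Nat := cs.foldl (fun a c => a * 31 + c.toNat) 0

-- Dict.insert: append [key, value] to bucket hash(key) % m
def pvInsert (m : Nat) (t : List (List (List Char × Int))) (key : List Char) (v : Int) :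
    List (List (List Char × Int)) :=
  t.modify (pvHash key % m) (fun b => b ++ [(key, v)])

-- Dict.find: scan bucket hash(key) % m, collect values whose key matches
def pvFind (m : Nat) (t : List (List (List Char × Int))) (key : List Char) : List Int :=
  (t.getD (pvHash key % m) []).foldl (fun r item => if item.1 = key then r ++ [item.2] else r) []

def prefix_suffix_overlap_hash1 (lst : List String) (k : Int) : List (Int × Int) :=
  let m := lst.length
  let table := (List.range m).foldl
    (fun t i => pvInsert m t (pvPrefix (lst.getD i "") k) (i : Int)) (List.replicate m [])
  (List.range m).foldl (fun r j =>
    (pvFind m table (pvSuffix (lst.getD j "") k)).foldl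
      (fun r num => if num ≠ (j : Int) then r ++ [(num, (j : Int))] else r) r) []

-- ===== PORT B =====
def prefix_suffix_overlap_hash1_alt (lst : List String) (k : Int) : List (Int × Int) :=
  (List.range lst.length).foldl (fun r j =>
    let suffix := pvSuffix (lst.getD j "") k
    (List.range lst.length).foldl (fun r i =>
      if i ≠ j ∧ pvPrefix (lst.getD i "") k = suffix then r ++ [((i : Int), (j : Int))] else r) r) []

-- ===== PRECONDITION & SPEC =====
def Spec_prefix_suffix_overlap_hash1 (lst : List String) (k : Int) (out : List (Int × Int)) : Prop := out = prefix_suffix_overlap_hash1_alt lst k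
instance (lst : List String) (k : Int) (out : List (Int × Int)) : Decidable (Spec_prefix_suffix_overlap_hash1 lst k out) := by unfold Spec_prefix_suffix_overlap_hash1; infer_instance

-- ===== CLAIM (what is proved, stated in full; the proofs are below) =====
def Claim_equal_prefix_suffix_overlap_hash1 : Prop := ∀ (lst : List String) (k : Int), Dom_prefix_suffix_overlap_hash1 lst k → Spec_prefix_suffix_overlap_hash1 lst k (prefix_suffix_overlap_hash1 lst k)

-- ===== LEMMAS AND PROOFS =====

-- the table built by A's first loop over indices 0..n-1
def pvBuild (lst : List String) (k : Int) (n : Nat) : List (List (List Char × Int)) :=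
  (List.range n).foldl
    (fun t i => pvInsert lst.length t (pvPrefix (lst.getD i "") k) (i : Int))
    (List.replicate lst.length [])

theorem pvBuild_length (lst : List String) (k : Int) (n : Nat) :
    (pvBuild lst k n).length = lst.length := by
  induction n with
  | zero => simp [pvBuild]
  | succ n ih =>
    simp only [pvBuild, List.range_succ, List.foldl_append, List.foldl_cons, List.foldl_nil]
    simpa [pvInsert] using ih

theorem pvFind_insert (m : Nat) (t : List (List (List Char × Int)))
    (hlen : t.length = m) (hm : 0 < m) (key' key : List Char) (v : Int) :
    pvFind m (pvInsert m t key' v) key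
      = pvFind m t key ++ (if key' = key then [v] else []) := by
  have hb' : pvHash key' % m < t.length := by rw [hlen]; exact Nat.mod_lt _ hm
  have hb : pvHash key % m < t.length := by rw [hlen]; exact Nat.mod_lt _ hm
  unfold pvFind pvInsert
  by_cases hk : key' = key
  · subst hk
    have : (t.modify (pvHash key' % m) (fun b => b ++ [(key', v)])).getD (pvHash key' % m) []
        = t.getD (pvHash key' % m) [] ++ [(key', v)] := by
      simp [List.getD_eq_getElem?_getD, List.getElem?_eq_getElem hb']
    rw [this, List.foldl_append]
    simp
  · by_cases hbb : pvHash key' % m = pvHash key % m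
    · have : (t.modify (pvHash key' % m) (fun b => b ++ [(key', v)])).getD (pvHash key % m) []
          = t.getD (pvHash key % m) [] ++ [(key', v)] := by
        simp [List.getD_eq_getElem?_getD, hbb,
          List.getElem?_eq_getElem hb]
      rw [this, List.foldl_append]
      simp [hk]
    · have : (t.modify (pvHash key' % m) (fun b => b ++ [(key', v)])).getD (pvHash key % m) []
          = t.getD (pvHash key % m) [] := by
        simp [List.getD_eq_getElem?_getD, hbb]
      rw [this]
      simp [hk]

theorem pvFind_build (lst : List String) (k : Int) (key : List Char) (n : Nat)
    (hn : n ≤ lst.length) :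
    pvFind lst.length (pvBuild lst k n) key
      = ((List.range n).filter (fun i => pvPrefix (lst.getD i "") k = key)).map
          (fun (i : Nat) => (i : Int)) := by
  induction n with
  | zero =>
    unfold pvBuild pvFind
    simp only [List.range_zero, List.filter_nil, List.map_nil, List.foldl_nil]
    have : (List.replicate lst.length ([] : List (List Char × Int))).getD
        (pvHash key % lst.length) [] = [] := by
      simp only [List.getD_eq_getElem?_getD, List.getElem?_replicate]
      split <;> rfl
    rw [this]
    rfl
  | succ n ih =>
    have hn' : n ≤ lst.length := Nat.le_of_succ_le hn
    have hm : 0 < lst.length := Nat.lt_of_lt_of_le (Nat.succ_pos n) hn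
    have hstep : pvBuild lst k (n + 1)
        = pvInsert lst.length (pvBuild lst k n) (pvPrefix (lst.getD n "") k) (n : Int) := by
      simp [pvBuild, List.range_succ]
    rw [hstep, pvFind_insert _ _ (pvBuild_length lst k n) hm, ih hn', List.range_succ,
      List.filter_append, List.map_append]
    congr 1
    by_cases h : pvPrefix (lst.getD n "") k = key <;>
      (simp only [List.getD_eq_getElem?_getD] at h; simp [h])

-- the inner loop of A, for a fixed j, equals the inner loop of B
theorem pv_inner (lst : List String) (k : Int) (j : Nat) (r : List (Int × Int)) :
    (pvFind lst.length (pvBuild lst k lst.length) (pvSuffix (lst.getD j "") k)).foldl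
        (fun r num => if num ≠ (j : Int) then r ++ [(num, (j : Int))] else r) r
      = (List.range lst.length).foldl (fun r i =>
          if i ≠ j ∧ pvPrefix (lst.getD i "") k = pvSuffix (lst.getD j "") k
          then r ++ [((i : Int), (j : Int))] else r) r := by
  rw [pvFind_build lst k _ lst.length le_rfl]
  have hA := PySem.List.foldl_append_if (fun num : Int => decide (num ≠ (j : Int)))
    (fun num => (num, (j : Int)))
    (((List.range lst.length).filter
        (fun i => pvPrefix (lst.getD i "") k = pvSuffix (lst.getD j "") k)).map
      (fun (i : Nat) => (i : Int))) r
  have hB := PySem.List.foldl_append_if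
    (fun i : Nat => decide (i ≠ j ∧ pvPrefix (lst.getD i "") k = pvSuffix (lst.getD j "") k))
    (fun i => ((i : Int), (j : Int))) (List.range lst.length) r
  simp only [decide_eq_true_eq] at hA hB
  rw [hA, hB]
  rw [List.filter_map, List.map_map, List.filter_filter]
  simp only [Function.comp_def]
  refine congrArg _ (congrArg _ (List.filter_congr ?_))
  intro i _
  simp [Nat.cast_inj]

-- ===== VERDICT (by name: the statement is the Claim_ definition above) =====
theorem prefix_suffix_overlap_hash1_spec : Claim_equal_prefix_suffix_overlap_hash1 := by
  intro lst k _
  unfold Spec_prefix_suffix_overlap_hash1 prefix_suffix_overlap_hash1 prefix_suffix_overlap_hash1_alt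
  simp only []
  have : ∀ (l : List Nat) (r : List (Int × Int)),
      l.foldl (fun r j =>
        (pvFind lst.length (pvBuild lst k lst.length) (pvSuffix (lst.getD j "") k)).foldl
          (fun r num => if num ≠ (j : Int) then r ++ [(num, (j : Int))] else r) r) r
      = l.foldl (fun r j =>
          (List.range lst.length).foldl (fun r i =>
            if i ≠ j ∧ pvPrefix (lst.getD i "") k = pvSuffix (lst.getD j "") k
            then r ++ [((i : Int), (j : Int))] else r) r) r := by
    intro l
    induction l with
    | nil => intro r; rfl
    | cons j l ih =>
      intro r
      rw [List.foldl_cons, List.foldl_cons, pv_inner]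
      exact ih _
  exact this (List.range lst.length) []
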